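-- pv_equiv track=rewrite | github.com/ikokkari/PythonProblems | labs109.py | count_troikas
-- ===== SOURCE A (Python) =====
-- from itertools import combinations, chain, islice, count, product, zip_longest
--
-- def count_troikas(items):
--     n, pos = len(items), dict()
--     for (i, e) in enumerate(items):
--         if e in pos:
--             pos[e].append(i)
--         else:
--             pos[e] = [i]
--     total = 0
--     for e in pos:
--         for (i, j) in combinations(pos[e], 2):
--             k = i + 2 * (j - i)
--             if k < n and items[k] == e:
--                 total += 1
--     return total
-- ===== SOURCE B (Python) =====
-- def count_troikas(items):
--     # scan by middle index: count j, d>=1 with items[j-d] == items[j] == items[j+d]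
--     n = len(items)
--     total = 0
--     for j in range(n):
--         m = min(j, n - 1 - j)
--         for d in range(1, m + 1):
--             if items[j - d] == items[j] == items[j + d]:
--                 total += 1
--     return total
-- ===== Notes on version B (the rewrite author's own statement) =====
-- stated objective: alternative
-- what changed: B drops the value-grouping dict and pair enumeration entirely and instead scans each middle index j with an offset d, counting j with items[j-d]==items[j]==items[j+d]; only geometrically valid triples are ever examined.
import Mathlib
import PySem

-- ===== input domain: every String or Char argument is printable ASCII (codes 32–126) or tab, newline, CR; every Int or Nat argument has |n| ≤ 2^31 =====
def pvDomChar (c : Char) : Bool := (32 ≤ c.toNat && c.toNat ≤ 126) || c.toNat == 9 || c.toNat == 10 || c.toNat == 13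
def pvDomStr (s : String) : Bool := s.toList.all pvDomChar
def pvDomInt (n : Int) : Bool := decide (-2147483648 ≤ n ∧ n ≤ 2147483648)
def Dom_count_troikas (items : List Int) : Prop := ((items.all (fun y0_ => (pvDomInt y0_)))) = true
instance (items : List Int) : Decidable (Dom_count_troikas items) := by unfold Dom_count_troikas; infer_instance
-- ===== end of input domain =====

-- B replaces A's value-grouping dict plus pair enumeration by a direct scan over
-- middle index and offset (objective: alternative algorithm of similar cost).

-- ===== PORT A =====
-- itertools.combinations(l, 2), transliterated (pairs in l's order)
def pvPairs {α : Type} (l : List α) : List (α × α) :=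
  match l with
  | [] => []
  | x :: xs => xs.map (fun y => (x, y)) ++ pvPairs xs

def count_troikas (items : List Int) : Int :=
  let n : Int := PySem.List.len items
  let pos : PySem.Dict Int (List Int) :=
    (PySem.List.enumerate items).foldl
      (fun d p => if d.contains p.2 then d.insert p.2 (d.getD p.2 [] ++ [p.1])
                  else d.insert p.2 [p.1]) PySem.Dict.empty
  pos.keys.foldl (fun total e =>
    (pvPairs (pos.getD e [])).foldl (fun total q =>
      if q.1 + 2 * (q.2 - q.1) < n ∧ PySem.List.pyGetD items (q.1 + 2 * (q.2 - q.1)) 0 = e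
      then total + 1 else total) total) 0

-- the grouping loop's step is exactly Dict.modify

-- ===== PORT B =====
def count_troikas_alt (items : List Int) : Int :=
  let n : Int := PySem.List.len items
  (PySem.List.pyRange 0 n 1).foldl (fun total j =>
    (PySem.List.pyRange 1 (min j (n - 1 - j) + 1) 1).foldl (fun total d =>
      if PySem.List.pyGetD items (j - d) 0 = PySem.List.pyGetD items j 0 ∧
         PySem.List.pyGetD items (j + d) 0 = PySem.List.pyGetD items j 0
      then total + 1 else total) total) 0

-- per-j reindexing: offsets d = 1..min(j, n-1-j) ↔ first indices i < j

-- ===== PRECONDITION & SPEC =====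
def Spec_count_troikas (items : List Int) (out : Int) : Prop := out = count_troikas_alt items
instance (items : List Int) (out : Int) : Decidable (Spec_count_troikas items out) := by unfold Spec_count_troikas; infer_instance

-- ===== CLAIM (what is proved, stated in full; the proofs are below) =====
def Claim_equal_count_troikas : Prop := ∀ (items : List Int), Dom_count_troikas items → Spec_count_troikas items (count_troikas items)

-- ===== LEMMAS AND PROOFS =====

def pvP (items : List Int) (i j : Nat) : Bool :=
  (items.getD i 0 == items.getD j 0) &&
  (decide (i + 2 * (j - i) < items.length)) &&
  (items.getD (i + 2 * (j - i)) 0 == items.getD i 0)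

def pvSpecCount (items : List Int) : Int :=
  ((List.range items.length).map
    (fun j => (((List.range j).countP (fun i => pvP items i j) : Nat) : Int))).sum

def pvPosDict (items : List Int) : PySem.Dict Int (List Int) :=
  (PySem.List.enumerate items).foldl
    (fun d p => d.modify p.2 [] (fun l => l ++ [p.1])) PySem.Dict.empty

theorem foldl_count_if' {α : Type} (P : α → Prop) [DecidablePred P] (l : List α) (a : Int) :
    l.foldl (fun acc x => if P x then acc + 1 else acc) a = a + l.countP (fun x => decide (P x)) := by
  induction l generalizing a with
  | nil => simp
  | cons x xs ih =>
    by_cases h : P x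
    · simp [h, ih]; ring
    · simp [h, ih]

theorem pyRange_one_eq_map (a : Int) (m : Nat) :
    PySem.List.pyRange a (a + m) 1 = (List.range m).map (fun k : Nat => a + (k : Int)) := by
  induction m with
  | zero => simp [PySem.List.pyRange]
  | succ m ih =>
    have h1 : (a : Int) + (m + 1 : Nat) = (a + m) + 1 := by push_cast; ring
    rw [h1, PySem.List.pyRange_one_succ_right (by omega), ih, List.range_succ]
    simp

theorem countP_eq_card_filter_range (p : Nat → Bool) (n : Nat) :
    (List.range n).countP p = ((Finset.range n).filter (fun i => p i)).card := by
  simp [Finset.range, Finset.filter, List.countP_eq_length_filter, Multiset.range]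

theorem countP_pyRange_one (p : Int → Bool) (a : Int) (m : Nat) :
    (PySem.List.pyRange a (a + m) 1).countP p = (List.range m).countP (fun k : Nat => p (a + (k : Int))) := by
  rw [pyRange_one_eq_map, List.countP_map]
  rfl

theorem stepA_eq_modify (d : PySem.Dict Int (List Int)) (p : Int × Int) :
    (if d.contains p.2 then d.insert p.2 (d.getD p.2 [] ++ [p.1]) else d.insert p.2 [p.1])
      = d.modify p.2 [] (fun l => l ++ [p.1]) := by
  by_cases h : d.contains p.2
  · simp [h]; rfl
  · simp only [h, if_neg, Bool.false_eq_true, not_false_iff]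
    have : d.getD p.2 [] = [] := PySem.Dict.getD_of_not_contains d [] (by simpa using h)
    show _ = d.insert p.2 (d.getD p.2 [] ++ [p.1])
    rw [this]; rfl

theorem posDict_keys (items : List Int) :
    (pvPosDict items).keys = PySem.Set.ofList items := by
  unfold pvPosDict
  have h := PySem.Dict.keys_foldl_modify_key (PySem.List.enumerate items)
      (fun p : Int × Int => p.2) ([] : List Int) (fun _ x l => l ++ [x.1]) PySem.Dict.empty
  exact h.trans (by rw [PySem.Dict.keys_empty, PySem.List.map_snd_enumerate, PySem.Set.update_nil_left])

theorem posDict_getD (items : List Int) (e : Int) :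
    (pvPosDict items).getD e []
      = ((PySem.List.enumerate items).filter (fun p => p.2 == e)).map (fun p => p.1) := by
  unfold pvPosDict
  have h := PySem.Dict.getD_foldl_modify_append
      ((PySem.List.enumerate items).map (fun p => (p.2, p.1))) PySem.Dict.empty e
  rw [List.foldl_map] at h
  refine h.trans ?_
  simp only [List.filter_map, List.map_map, Function.comp_def]
  rw [PySem.Dict.getD_empty, List.nil_append]

theorem posDict_getD_range (items : List Int) (e : Int) :
    (pvPosDict items).getD e []
      = ((List.range items.length).filter (fun i => items.getD i 0 == e)).map (fun i : Nat => (i : Int)) := by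
  rw [posDict_getD, PySem.List.enumerate_eq_map_pyRange items 0]
  rw [show PySem.List.len items = ((items.length : Nat) : Int) from by simp [PySem.List.len]]
  rw [PySem.List.pyRange_zero_natCast, List.map_map, List.filter_map, List.map_map]
  simp [Function.comp_def, PySem.List.pyGetD_natCast]

theorem pvPairs_map {α β : Type} (f : α → β) (l : List α) :
    pvPairs (l.map f) = (pvPairs l).map (Prod.map f f) := by
  induction l with
  | nil => rfl
  | cons x xs ih => simp [pvPairs, ih, List.map_map, Function.comp_def, Prod.map]

theorem countP_pvPairs_filter {α : Type} (q : α → Bool) (p : α × α → Bool) (l : List α) :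
    (pvPairs (l.filter q)).countP p
      = (pvPairs l).countP (fun ab => q ab.1 && q ab.2 && p ab) := by
  induction l with
  | nil => rfl
  | cons x xs ih =>
    by_cases h : q x
    · simp only [List.filter_cons, h, if_pos, pvPairs, List.countP_append, ih,
        List.countP_map, List.countP_filter]
      congr 1
      apply List.countP_congr
      intro y _
      simp [Function.comp, h, And.comm]
    · simp only [List.filter_cons, h, Bool.false_eq_true, if_neg, not_false_iff, pvPairs,
        List.countP_append, ih, List.countP_map]
      have : xs.countP ((fun ab => q ab.1 && q ab.2 && p ab) ∘ fun y => (x, y)) = 0 := by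
        apply List.countP_eq_zero.mpr
        intro y _
        simp [Function.comp, h]
      omega

theorem countP_pvPairs_append_singleton {α : Type} (p : α × α → Bool) (l : List α) (x : α) :
    (pvPairs (l ++ [x])).countP p = (pvPairs l).countP p + l.countP (fun y => p (y, x)) := by
  induction l with
  | nil => simp [pvPairs]
  | cons z zs ih =>
    simp only [List.cons_append, pvPairs, List.countP_append, ih, List.countP_map,
      List.map_append, List.countP_cons]
    simp [Function.comp_def]
    split_ifs <;> omega

theorem countP_pvPairs_range (p : Nat × Nat → Bool) (n : Nat) :
    (pvPairs (List.range n)).countP p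
      = ((List.range n).map (fun j => (List.range j).countP (fun i => p (i, j)))).sum := by
  induction n with
  | zero => rfl
  | succ n ih =>
    rw [List.range_succ, countP_pvPairs_append_singleton, ih,
      List.map_append, List.sum_append]
    simp

theorem mem_pvPairs {α : Type} (l : List α) (q : α × α) (h : q ∈ pvPairs l) :
    q.1 ∈ l ∧ q.2 ∈ l := by
  induction l with
  | nil => simp [pvPairs] at h
  | cons x xs ih =>
    simp only [pvPairs, List.mem_append, List.mem_map] at h
    rcases h with ⟨y, hy, rfl⟩ | h
    · exact ⟨List.mem_cons_self, List.mem_cons_of_mem _ hy⟩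
    · exact ⟨List.mem_cons_of_mem _ (ih h).1, List.mem_cons_of_mem _ (ih h).2⟩

theorem pairwise_pvPairs {α : Type} (R : α → α → Prop) (l : List α) (hl : l.Pairwise R)
    (q : α × α) (h : q ∈ pvPairs l) : R q.1 q.2 := by
  induction l with
  | nil => simp [pvPairs] at h
  | cons x xs ih =>
    rw [List.pairwise_cons] at hl
    simp only [pvPairs, List.mem_append, List.mem_map] at h
    rcases h with ⟨y, hy, rfl⟩ | h
    · exact hl.1 y hy
    · exact ih hl.2 h

theorem sum_countP_comm {β : Type} (es : List Int) (L : List β) (p : Int → β → Bool) :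
    (es.map (fun e => ((L.countP (p e) : Nat) : Int))).sum
      = (L.map (fun x => ((es.countP (fun e => p e x) : Nat) : Int))).sum := by
  induction es with
  | nil => simp
  | cons e es ih =>
    simp only [List.map_cons, List.sum_cons, List.countP_cons]
    push_cast
    rw [PySem.List.sum_map_add_int, ih, ← PySem.List.sum_map_ite_one_zero (p e) L]
    ring

theorem countP_eq_indicator (es : List Int) (hnd : es.Nodup) (a : Int) (ha : a ∈ es)
    (r : Int → Bool) :
    es.countP (fun e => (a == e) && r e) = if r a then 1 else 0 := by
  induction es with
  | nil => simp at ha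
  | cons e es ih =>
    rw [List.nodup_cons] at hnd
    rw [List.countP_cons]
    rcases List.mem_cons.mp ha with rfl | hmem
    · have h0 : es.countP (fun e => (a == e) && r e) = 0 := by
        apply List.countP_eq_zero.mpr
        intro y hy
        have : a ≠ y := fun h => hnd.1 (h ▸ hy)
        simp [this]
      rw [h0]
      simp
    · have hne : (a == e) = false := by
        have : a ≠ e := fun h => hnd.1 (h ▸ hmem)
        simp [this]
      rw [ih hnd.2 hmem]
      simp [hne]

theorem per_j (items : List Int) (j : Nat) (hj : j < items.length) :
    ((List.range (min j (items.length - 1 - j))).countP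
       (fun k => decide (items.getD (j - (k+1)) 0 = items.getD j 0 ∧
                         items.getD (j + (k+1)) 0 = items.getD j 0)))
      = (List.range j).countP (fun i => pvP items i j) := by
  rw [countP_eq_card_filter_range, countP_eq_card_filter_range]
  apply Finset.card_bij' (fun k _ => j - (k+1)) (fun i _ => j - (i+1))
  · intro k hk
    simp only [Finset.mem_filter, Finset.mem_range, decide_eq_true_eq] at hk ⊢
    obtain ⟨hk1, hq1, hq2⟩ := hk
    have hd : k + 1 ≤ j ∧ j + (k+1) ≤ items.length - 1 := by omega
    refine ⟨by omega, ?_⟩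
    have hi : j - (k+1) + 2 * (j - (j - (k+1))) = j + (k+1) := by omega
    simp only [pvP, hi, Bool.and_eq_true, beq_iff_eq, decide_eq_true_eq]
    exact ⟨⟨hq1, by omega⟩, by rw [hq2, hq1]⟩
  · intro i hi
    simp only [Finset.mem_filter, Finset.mem_range] at hi ⊢
    obtain ⟨hi1, hp⟩ := hi
    simp only [pvP, Bool.and_eq_true, beq_iff_eq, decide_eq_true_eq] at hp
    obtain ⟨⟨hv, hk⟩, hvk⟩ := hp
    have hji : j - (i+1) + 1 = j - i := by omega
    have h3 : j - (j - (i+1) + 1) = i := by omega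
    have h4 : j + (j - (i+1) + 1) = i + 2 * (j - i) := by omega
    refine ⟨by omega, ?_⟩
    rw [hji] at h3 h4 ⊢
    rw [decide_eq_true_eq]
    constructor
    · rw [show j - (j - i) = i from by omega]; exact hv
    · rw [show j + (j - i) = i + 2 * (j - i) from by omega, hvk, hv]
  · intro k hk; simp only [Finset.mem_filter, Finset.mem_range] at hk; omega
  · intro i hi
    simp only [Finset.mem_filter, Finset.mem_range, pvP, Bool.and_eq_true, decide_eq_true_eq] at hi
    omega

theorem B_eq_spec (items : List Int) : count_troikas_alt items = pvSpecCount items := by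
  unfold count_troikas_alt pvSpecCount
  have hlen : PySem.List.len items = (items.length : Int) := by simp [PySem.List.len]
  rw [hlen]
  dsimp only
  rw [PySem.List.pyRange_zero_natCast, List.foldl_map]
  simp only [foldl_count_if']
  rw [PySem.List.foldl_add, Int.zero_add]
  congr 1
  apply List.map_congr_left
  intro j hj
  rw [List.mem_range] at hj
  have hmin : min (j : Int) ((items.length : Int) - 1 - j) + 1
      = 1 + ((min j (items.length - 1 - j) : Nat) : Int) := by
    push_cast [Nat.cast_min]; omega
  rw [hmin, countP_pyRange_one]
  rw [← per_j items j hj]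
  congr 1
  apply List.countP_congr
  intro k hk
  rw [List.mem_range] at hk
  have h1 : (j : Int) - (1 + (k : Int)) = ((j - (k+1) : Nat) : Int) := by omega
  have h2 : (j : Int) + (1 + (k : Int)) = ((j + (k+1) : Nat) : Int) := by push_cast; omega
  simp only [h1, h2, PySem.List.pyGetD_natCast]

theorem A_eq_spec (items : List Int) : count_troikas items = pvSpecCount items := by
  unfold count_troikas
  dsimp only
  simp only [stepA_eq_modify]
  rw [show (List.foldl (fun d p => d.modify p.2 [] fun l => l ++ [p.1]) PySem.Dict.empty
        (PySem.List.enumerate items)) = pvPosDict items from rfl]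
  rw [posDict_keys]
  simp only [foldl_count_if']
  rw [PySem.List.foldl_add, Int.zero_add]
  simp only [posDict_getD_range, pvPairs_map, List.countP_map, countP_pvPairs_filter]
  simp only [Function.comp_def, Prod.map_fst, Prod.map_snd, Bool.and_assoc]
  rw [sum_countP_comm]
  have hstep : ∀ q ∈ pvPairs (List.range items.length),
      (((PySem.Set.ofList items).countP (fun e =>
          items.getD q.1 0 == e &&
            (items.getD q.2 0 == e &&
              decide ((q.1 : Int) + 2 * ((q.2 : Int) - (q.1 : Int)) < PySem.List.len items ∧
                PySem.List.pyGetD items ((q.1 : Int) + 2 * ((q.2 : Int) - (q.1 : Int))) 0 = e))) : Nat) : Int)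
        = if pvP items q.1 q.2 then (1 : Int) else 0 := by
    intro q hq
    have hlt : q.1 < q.2 := pairwise_pvPairs _ _ (List.pairwise_lt_range) q hq
    have hmem2 : q.2 < items.length := by
      have := (mem_pvPairs _ _ hq).2
      rwa [List.mem_range] at this
    have hmem : items.getD q.1 0 ∈ PySem.Set.ofList items := by
      rw [PySem.Set.mem_ofList]
      rw [List.getD_eq_getElem items 0 (by omega)]
      exact List.getElem_mem _
    rw [countP_eq_indicator _ (PySem.Set.nodup_ofList items) _ hmem]
    have hk : (q.1 : Int) + 2 * ((q.2 : Int) - (q.1 : Int)) = ((q.1 + 2 * (q.2 - q.1) : Nat) : Int) := by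
      push_cast; omega
    have hlen : PySem.List.len items = ((items.length : Nat) : Int) := by simp [PySem.List.len]
    rw [hk, hlen, PySem.List.pyGetD_natCast]
    unfold pvP
    simp only [Bool.and_assoc, decide_eq_true_eq, Bool.and_eq_true, beq_iff_eq, Nat.cast_lt]
    split_ifs with h1 h2 <;> simp_all [eq_comm]
  refine Eq.trans (congrArg List.sum (List.map_congr_left hstep)) ?_
  rw [PySem.List.sum_map_ite_one_zero (fun q => pvP items q.1 q.2) (pvPairs (List.range items.length))]
  rw [countP_pvPairs_range]
  unfold pvSpecCount
  rw [Nat.cast_list_sum, List.map_map]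
  rfl


-- ===== VERDICT (by name: the statement is the Claim_ definition above) =====
theorem count_troikas_spec : Claim_equal_count_troikas := by
  intro items _
  unfold Spec_count_troikas
  rw [A_eq_spec, B_eq_spec]
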